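-- pv_equiv track=rewrite | github.com/nirajyt2022-source/edTech | curriculum/validate_graph.py | check_6_integrity
-- ===== SOURCE A (Python) =====
-- def check_6_integrity(graph: dict, nodes_by_id: dict) -> list[str]:
--     """No circular next_skills, version is 1.1.0, no dangling refs."""
--     errors = []
--
--     # Version check
--     if graph.get("version") != "1.1.0":
--         errors.append(f"[CHECK 6] Graph version is '{graph.get('version')}', expected '1.1.0'")
--
--     # Cycle detection via DFS
--     WHITE, GRAY, BLACK = 0, 1, 2
--     color = {sid: WHITE for sid in nodes_by_id}
--
--     def dfs(sid, path):
--         cycle_errors = []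
--         color[sid] = GRAY
--         for nxt in nodes_by_id[sid].get("next_skills", []):
--             if nxt not in nodes_by_id:
--                 continue  # already caught by check_1
--             if color[nxt] == GRAY:
--                 cycle_errors.append(
--                     f"[CHECK 6] Cycle detected: {' → '.join(path + [nxt])}"
--                 )
--             elif color[nxt] == WHITE:
--                 cycle_errors.extend(dfs(nxt, path + [nxt]))
--         color[sid] = BLACK
--         return cycle_errors
--
--     for sid in nodes_by_id:
--         if color[sid] == WHITE:
--             errors.extend(dfs(sid, [sid]))
--
--     return errors
-- ===== SOURCE B (Python) =====
-- def check_6_integrity(graph: dict, nodes_by_id: dict) -> list[str]: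
--     """No circular next_skills, version is 1.1.0, no dangling refs.
--
--     Same checks as before, but the cycle detection is an iterative DFS with an
--     explicit work stack (enter / post-visit items) instead of recursion.
--     """
--     errors = []
--
--     if graph.get("version") != "1.1.0":
--         errors.append(f"[CHECK 6] Graph version is '{graph.get('version')}', expected '1.1.0'")
--
--     WHITE, GRAY, BLACK = 0, 1, 2
--     color = {sid: WHITE for sid in nodes_by_id}
--
--     # Work stack; items: ("top", sid), ("visit", nxt, path), ("mark", sid).
--     stack = [("top", sid) for sid in reversed(list(nodes_by_id))]
--     while stack:
--         item = stack.pop()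
--         kind = item[0]
--         if kind == "mark":
--             color[item[1]] = BLACK
--         elif kind == "top":
--             sid = item[1]
--             if sid in nodes_by_id and color[sid] == WHITE:
--                 color[sid] = GRAY
--                 stack.append(("mark", sid))
--                 for nxt in reversed(nodes_by_id[sid].get("next_skills", [])):
--                     stack.append(("visit", nxt, [sid]))
--         else:  # "visit"
--             _, nxt, path = item
--             if nxt not in nodes_by_id:
--                 continue
--             c = color[nxt]
--             if c == GRAY:
--                 errors.append(f"[CHECK 6] Cycle detected: {' → '.join(path + [nxt])}")
--             elif c == WHITE:
--                 color[nxt] = GRAY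
--                 newpath = path + [nxt]
--                 stack.append(("mark", nxt))
--                 for ch in reversed(nodes_by_id[nxt].get("next_skills", [])):
--                     stack.append(("visit", ch, newpath))
--     return errors
-- ===== Notes on version B (the rewrite author's own statement) =====
-- stated objective: alternative
-- what changed: The recursive three-color DFS is replaced by an iterative DFS driven by an explicit work stack of enter/visit/post-visit items, preserving the exact interleaving of cycle-error emission and subtree descent.
import Mathlib
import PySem

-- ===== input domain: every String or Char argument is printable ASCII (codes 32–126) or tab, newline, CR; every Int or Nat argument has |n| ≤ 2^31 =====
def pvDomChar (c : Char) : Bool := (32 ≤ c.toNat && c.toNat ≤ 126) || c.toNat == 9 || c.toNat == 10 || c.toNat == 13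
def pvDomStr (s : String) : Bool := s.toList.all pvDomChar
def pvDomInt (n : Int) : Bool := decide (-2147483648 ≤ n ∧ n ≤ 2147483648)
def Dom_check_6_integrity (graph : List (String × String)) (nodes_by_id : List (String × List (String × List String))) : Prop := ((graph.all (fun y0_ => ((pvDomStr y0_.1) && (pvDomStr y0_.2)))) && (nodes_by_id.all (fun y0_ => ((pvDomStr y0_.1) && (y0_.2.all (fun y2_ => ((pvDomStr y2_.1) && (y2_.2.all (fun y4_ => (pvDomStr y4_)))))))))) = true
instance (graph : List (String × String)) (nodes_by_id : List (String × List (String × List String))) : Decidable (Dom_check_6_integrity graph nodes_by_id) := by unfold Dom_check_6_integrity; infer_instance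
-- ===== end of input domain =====

-- B replaces A's recursive DFS by an iterative DFS over an explicit work stack
-- (enter / post-visit items); same return value, different decomposition.

-- Shared transliterations of lines both Pythons contain verbatim:
-- the version check, the cycle message, and nodes_by_id[sid].get("next_skills", []).
def pvVersionErrs (graph : List (String × String)) : List String :=
  match (PySem.Dict.ofList graph).get? "version" with
  | some v => if v = "1.1.0" then [] else ["[CHECK 6] Graph version is '" ++ v ++ "', expected '1.1.0'"]
  | none => ["[CHECK 6] Graph version is 'None', expected '1.1.0'"]

def pvMsgCycle (path : List String) : String :=
  "[CHECK 6] Cycle detected: " ++ PySem.Str.join " → " path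

def pvNext (nodes : PySem.Dict String (List (String × List String))) (sid : String) : List String :=
  (PySem.Dict.ofList ((nodes.get? sid).getD [])).getD "next_skills" []

-- ===== PORT A =====
-- A's recursive dfs; fuel only guards termination (depth ≤ #WHITE nodes < fuel at every call).
mutual
def pvDfsA (nodes : PySem.Dict String (List (String × List String))) :
    Nat → PySem.Dict String Int → String → List String → (List String × PySem.Dict String Int)
  | 0, col, _, _ => ([], col)
  | f + 1, col, sid, path =>
    let col1 := col.insert sid 1
    let r := pvLoopA nodes f col1 (pvNext nodes sid) path
    (r.1, r.2.insert sid 2)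
termination_by f _ _ _ => (f, 0)
def pvLoopA (nodes : PySem.Dict String (List (String × List String))) :
    Nat → PySem.Dict String Int → List String → List String → (List String × PySem.Dict String Int)
  | _, col, [], _ => ([], col)
  | f, col, nxt :: rest, path =>
    if nodes.contains nxt = false then pvLoopA nodes f col rest path
    else if col.getD nxt 0 = 1 then
      let r := pvLoopA nodes f col rest path
      (pvMsgCycle (path ++ [nxt]) :: r.1, r.2)
    else if col.getD nxt 0 = 0 then
      let r1 := pvDfsA nodes f col nxt (path ++ [nxt])
      let r2 := pvLoopA nodes f r1.2 rest path
      (r1.1 ++ r2.1, r2.2)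
    else pvLoopA nodes f col rest path
termination_by f _ l _ => (f, l.length + 1)
end

def check_6_integrity (graph : List (String × String)) (nodes_by_id : List (String × List (String × List String))) : List String :=
  let nodes := PySem.Dict.ofList nodes_by_id
  let keys := nodes.keys
  let color0 : PySem.Dict String Int := PySem.Dict.ofList (keys.map fun k => (k, (0 : Int)))
  let r := keys.foldl (fun (st : List String × PySem.Dict String Int) sid =>
      if st.2.getD sid 0 = 0 then
        let d := pvDfsA nodes (keys.length + 1) st.2 sid [sid]
        (st.1 ++ d.1, d.2)
      else st) (pvVersionErrs graph, color0)
  r.1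

-- ===== PORT B =====
inductive PvItem : Type
  | top : String → PvItem
  | visit : String → List String → PvItem
  | mark : String → PvItem
deriving Repr, DecidableEq

-- number of WHITE nodes: the termination measure of the stack machine
def pvWhite (nodes : PySem.Dict String (List (String × List String))) (col : PySem.Dict String Int) : Nat :=
  (nodes.keys.filter (fun k => col.getD k 0 == 0)).length

theorem pvFilterLt {α : Type} (l : List α) (p p' : α → Bool)
    (h : ∀ x, p' x = true → p x = true) (x : α) (hx : x ∈ l) (hp : p x = true) (hp' : p' x = false) :
    (l.filter p').length < (l.filter p).length := by
  induction l with
  | nil => cases hx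
  | cons a t ih =>
    rcases List.mem_cons.mp hx with rfl | hxt
    · have hle : (t.filter p').length ≤ (t.filter p).length :=
        (List.monotone_filter_right t (fun a ha => h a ha)).length_le
      simp [List.filter_cons, hp, hp']
      omega
    · by_cases hpa : p' a = true
      · have := h a hpa
        simp [List.filter_cons, hpa, this]
        exact ih hxt
      · have hlt := ih hxt
        simp only [Bool.not_eq_true] at hpa
        by_cases hqa : p a = true <;> simp [List.filter_cons, hpa, hqa] <;> omega

theorem pvWhiteInsertLe (nodes : PySem.Dict String (List (String × List String)))
    (col : PySem.Dict String Int) (k : String) (v : Int) (hv : v ≠ 0) :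
    pvWhite nodes (col.insert k v) ≤ pvWhite nodes col := by
  unfold pvWhite
  refine (List.monotone_filter_right _ ?_).length_le
  intro x hx
  rw [PySem.Dict.getD_insert] at hx
  by_cases hxk : x = k
  · simp [hxk] at hx; exact absurd hx hv
  · simpa [hxk] using hx

theorem pvWhiteInsertLt (nodes : PySem.Dict String (List (String × List String)))
    (col : PySem.Dict String Int) (k : String) (v : Int) (hv : v ≠ 0)
    (hk : nodes.contains k = true) (h0 : col.getD k 0 = 0) :
    pvWhite nodes (col.insert k v) < pvWhite nodes col := by
  unfold pvWhite
  refine pvFilterLt _ _ _ ?_ k ((PySem.Dict.contains_iff_mem_keys _ _).mp hk) (by simp [h0]) ?_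
  · intro x hx
    rw [PySem.Dict.getD_insert] at hx
    by_cases hxk : x = k
    · simp [hxk] at hx; exact absurd hx hv
    · simpa [hxk] using hx
  · rw [PySem.Dict.getD_insert]; simp [hv]

theorem pvLexStep {a a' b b' : Nat} (h1 : a' ≤ a) (h2 : b' < b) :
    Prod.Lex (· < ·) (· < ·) (a', b') (a, b) := by
  rcases Nat.lt_or_ge a' a with h | h
  · exact Prod.Lex.left _ _ h
  · have : a' = a := Nat.le_antisymm h1 h
    subst this; exact Prod.Lex.right _ h2

-- B: iterative DFS over an explicit stack (head = top of stack)
def pvRunB (nodes : PySem.Dict String (List (String × List String))) :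
    PySem.Dict String Int → List PvItem → List String
  | _, [] => []
  | col, PvItem.mark sid :: rest => pvRunB nodes (col.insert sid 2) rest
  | col, PvItem.top sid :: rest =>
    if h : nodes.contains sid = true ∧ col.getD sid 0 = 0 then
      pvRunB nodes (col.insert sid 1)
        (((pvNext nodes sid).map (fun c => PvItem.visit c [sid])) ++ (PvItem.mark sid :: rest))
    else pvRunB nodes col rest
  | col, PvItem.visit nxt path :: rest =>
    if hm : nodes.contains nxt = true then
      if col.getD nxt 0 = 1 then
        pvMsgCycle (path ++ [nxt]) :: pvRunB nodes col rest
      else if hw : col.getD nxt 0 = 0 then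
        pvRunB nodes (col.insert nxt 1)
          (((pvNext nodes nxt).map (fun c => PvItem.visit c (path ++ [nxt]))) ++ (PvItem.mark nxt :: rest))
      else pvRunB nodes col rest
    else pvRunB nodes col rest
termination_by col items => (pvWhite nodes col, items.length)
decreasing_by
  · exact pvLexStep (pvWhiteInsertLe _ _ _ _ (by norm_num)) (Nat.lt_succ_self _)
  · exact Prod.Lex.left _ _ (pvWhiteInsertLt _ _ _ _ (by norm_num) h.1 h.2)
  · exact pvLexStep (Nat.le_refl _) (Nat.lt_succ_self _)
  · exact pvLexStep (Nat.le_refl _) (Nat.lt_succ_self _)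
  · exact Prod.Lex.left _ _ (pvWhiteInsertLt _ _ _ _ (by norm_num) hm hw)
  · exact pvLexStep (Nat.le_refl _) (Nat.lt_succ_self _)
  · exact pvLexStep (Nat.le_refl _) (Nat.lt_succ_self _)

def check_6_integrity_alt (graph : List (String × String)) (nodes_by_id : List (String × List (String × List String))) : List String :=
  let nodes := PySem.Dict.ofList nodes_by_id
  let keys := nodes.keys
  let color0 : PySem.Dict String Int := PySem.Dict.ofList (keys.map fun k => (k, (0 : Int)))
  pvVersionErrs graph ++ pvRunB nodes color0 (keys.map PvItem.top)

-- ===== PRECONDITION & SPEC =====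
def Spec_check_6_integrity (graph : List (String × String)) (nodes_by_id : List (String × List (String × List String))) (out : List String) : Prop := out = check_6_integrity_alt graph nodes_by_id
instance (graph : List (String × String)) (nodes_by_id : List (String × List (String × List String))) (out : List String) : Decidable (Spec_check_6_integrity graph nodes_by_id out) := by unfold Spec_check_6_integrity; infer_instance

-- ===== CLAIM (what is proved, stated in full; the proofs are below) =====
def Claim_equal_check_6_integrity : Prop := ∀ (graph : List (String × String)) (nodes_by_id : List (String × List (String × List String))), Dom_check_6_integrity graph nodes_by_id → Spec_check_6_integrity graph nodes_by_id (check_6_integrity graph nodes_by_id)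

-- ===== LEMMAS AND PROOFS =====

theorem pvWhiteLe (nodes : PySem.Dict String (List (String × List String))) (col : PySem.Dict String Int) :
    pvWhite nodes col ≤ nodes.keys.length := List.length_filter_le _ _

theorem pvWhitePos (nodes : PySem.Dict String (List (String × List String))) (col : PySem.Dict String Int)
    (k : String) (hk : nodes.contains k = true) (h0 : col.getD k 0 = 0) : 1 ≤ pvWhite nodes col := by
  unfold pvWhite
  have : k ∈ nodes.keys.filter (fun k => col.getD k 0 == 0) :=
    List.mem_filter.mpr ⟨(PySem.Dict.contains_iff_mem_keys _ _).mp hk, by simp [h0]⟩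
  exact List.length_pos_of_mem this

-- colors only move forward, so the WHITE count never grows through A's dfs/loop
theorem pvMonoA (nodes : PySem.Dict String (List (String × List String))) :
    ∀ f : Nat, (∀ col sid path, pvWhite nodes (pvDfsA nodes f col sid path).2 ≤ pvWhite nodes col) ∧
      (∀ col nxts path, pvWhite nodes (pvLoopA nodes f col nxts path).2 ≤ pvWhite nodes col) := by
  intro f
  induction f using Nat.strong_induction_on with
  | _ f ih =>
    have hdfs : ∀ col sid path, pvWhite nodes (pvDfsA nodes f col sid path).2 ≤ pvWhite nodes col := by
      intro col sid path
      match f with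
      | 0 => simp [pvDfsA]
      | g + 1 =>
        simp only [pvDfsA]
        calc pvWhite nodes ((pvLoopA nodes g (col.insert sid 1) (pvNext nodes sid) path).2.insert sid 2)
            ≤ pvWhite nodes (pvLoopA nodes g (col.insert sid 1) (pvNext nodes sid) path).2 :=
              pvWhiteInsertLe _ _ _ _ (by norm_num)
          _ ≤ pvWhite nodes (col.insert sid 1) := (ih g (Nat.lt_succ_self _)).2 _ _ _
          _ ≤ pvWhite nodes col := pvWhiteInsertLe _ _ _ _ (by norm_num)
    refine ⟨hdfs, ?_⟩
    intro col nxts path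
    induction nxts generalizing col with
    | nil => simp [pvLoopA]
    | cons nxt rest ihl =>
      by_cases hc : nodes.contains nxt = false
      · simpa [pvLoopA, hc] using ihl col
      · simp only [Bool.not_eq_false] at hc
        by_cases h1 : col.getD nxt 0 = 1
        · simpa [pvLoopA, hc, h1] using ihl col
        · by_cases h0 : col.getD nxt 0 = 0
          · simp only [pvLoopA, hc, h1, h0, if_true, if_false, reduceIte]
            calc pvWhite nodes (pvLoopA nodes f (pvDfsA nodes f col nxt (path ++ [nxt])).2 rest path).2
                ≤ pvWhite nodes (pvDfsA nodes f col nxt (path ++ [nxt])).2 := ihl _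
              _ ≤ pvWhite nodes col := hdfs _ _ _
          · simpa [pvLoopA, hc, h1, h0] using ihl col

-- the heart: B's stack machine run on a block of scheduled child visits is A's loop
theorem pvSim (nodes : PySem.Dict String (List (String × List String))) :
    ∀ (f : Nat) (col : PySem.Dict String Int) (nxts path : List String) (rest : List PvItem),
      pvWhite nodes col ≤ f →
      pvRunB nodes col ((nxts.map fun c => PvItem.visit c path) ++ rest)
        = (pvLoopA nodes f col nxts path).1 ++ pvRunB nodes (pvLoopA nodes f col nxts path).2 rest := by
  intro f
  induction f using Nat.strong_induction_on with
  | _ f ih =>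
    intro col nxts path rest hf
    induction nxts generalizing col rest with
    | nil => simp [pvLoopA]
    | cons nxt rest' ihl =>
      by_cases hc : nodes.contains nxt = false
      · rw [List.map_cons, List.cons_append, pvRunB, pvLoopA, ihl col rest hf]
        simp [hc]
      · simp only [Bool.not_eq_false] at hc
        by_cases h1 : col.getD nxt 0 = 1
        · rw [List.map_cons, List.cons_append, pvRunB, pvLoopA, ihl col rest hf]
          simp [hc, h1]
        · by_cases h0 : col.getD nxt 0 = 0
          · match f with
            | 0 => exact absurd (le_trans (pvWhitePos nodes col nxt hc h0) hf) (by omega)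
            | g + 1 =>
              have hlt : pvWhite nodes (col.insert nxt 1) < pvWhite nodes col :=
                pvWhiteInsertLt _ _ _ _ (by norm_num) hc h0
              rw [List.map_cons, List.cons_append, pvRunB]
              simp only [hc, h1, h0, Int.reduceEq, and_self, dite_true, reduceDIte, reduceIte, if_true, if_false]
              rw [ih g (Nat.lt_succ_self _) (col.insert nxt 1) (pvNext nodes nxt) (path ++ [nxt]) _ (by omega)]
              rw [pvRunB]
              set r := pvLoopA nodes g (col.insert nxt 1) (pvNext nodes nxt) (path ++ [nxt]) with hr
              have hr2 : pvWhite nodes (r.2.insert nxt 2) ≤ g + 1 := by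
                have h2 : pvWhite nodes r.2 ≤ pvWhite nodes (col.insert nxt 1) := (pvMonoA nodes g).2 _ _ _
                have h3 := pvWhiteInsertLe nodes r.2 nxt 2 (by norm_num)
                omega
              rw [ihl (r.2.insert nxt 2) rest hr2]
              rw [pvLoopA]
              simp only [hc, h1, h0, if_true, if_false, reduceIte]
              rw [pvDfsA]
              simp [← hr, List.append_assoc]
          · rw [List.map_cons, List.cons_append, pvRunB, pvLoopA, ihl col rest hf]
            simp [hc, h1, h0]

theorem pvTop (nodes : PySem.Dict String (List (String × List String))) :
    ∀ (ks : List String) (errs : List String) (col : PySem.Dict String Int),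
      (∀ s ∈ ks, nodes.contains s = true) →
      (ks.foldl (fun (st : List String × PySem.Dict String Int) sid =>
          if st.2.getD sid 0 = 0 then
            let d := pvDfsA nodes (nodes.keys.length + 1) st.2 sid [sid]
            (st.1 ++ d.1, d.2)
          else st) (errs, col)).1
        = errs ++ pvRunB nodes col (ks.map PvItem.top) := by
  intro ks
  induction ks with
  | nil => intro errs col _; simp [pvRunB]
  | cons s ks' ih =>
    intro errs col hmem
    have hcs : nodes.contains s = true := hmem s (List.mem_cons_self ..)
    by_cases h0 : col.getD s 0 = 0
    · rw [List.foldl_cons]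
      simp only [h0, if_true, reduceIte]
      rw [ih _ _ (fun t ht => hmem t (List.mem_cons_of_mem _ ht))]
      rw [List.map_cons, pvRunB]
      simp only [hcs, h0, and_self, dite_true, reduceDIte]
      rw [pvDfsA]
      rw [pvSim nodes (nodes.keys.length) (col.insert s 1) (pvNext nodes s) [s]
            (PvItem.mark s :: ks'.map PvItem.top)
            (le_trans (pvWhiteInsertLe _ _ _ _ (by norm_num)) (pvWhiteLe nodes col))]
      rw [pvRunB]
      simp [List.append_assoc]
    · rw [List.foldl_cons]
      simp only [h0, if_false, reduceIte]
      rw [ih _ _ (fun t ht => hmem t (List.mem_cons_of_mem _ ht))]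
      rw [List.map_cons, pvRunB]
      simp only [hcs, h0, and_false, dite_false, reduceDIte]

-- ===== VERDICT (by name: the statement is the Claim_ definition above) =====
theorem check_6_integrity_spec : Claim_equal_check_6_integrity := by
  intro graph nodes_by_id _
  unfold Spec_check_6_integrity check_6_integrity check_6_integrity_alt
  exact pvTop (PySem.Dict.ofList nodes_by_id) _ _ _
    (fun s hs => (PySem.Dict.contains_iff_mem_keys _ _).mpr hs)
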